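-- pv_equiv track=rewrite | github.com/KyleRego/anki_enumeration_tool | __init__.py | make_osce_notes
-- ===== SOURCE A (Python) =====
-- from typing import Sequence, Union
--
-- def make_osce_notes(a: str) -> Sequence[str]:
--     string_list: Sequence[str] = a.split('\n')
--     out_list = []
--     for line in string_list:
--         important_line = line
--         index_of_line = string_list.index(line)
--         if index_of_line == 0:
--             out_list.append(f"{1}: {{{{c1::{important_line}}}}}")
--         if index_of_line > 0:
--             not_important_lines = string_list[:index_of_line]
--             outstring = ""
--             i = 1
--             for notimportline in not_important_lines:
--                 outstring += f"{i}: {notimportline}<br>"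
--                 i += 1
--             outstring += f"{i}: {{{{c1::{important_line}}}}}"
--             out_list.append(outstring)
--
--     return out_list
-- ===== SOURCE B (Python) =====
-- def make_osce_notes(a):
--     lines = a.split('\n')
--     prefix = [""]
--     last = ""
--     for k, line in enumerate(lines, 1):
--         last = last + f"{k}: {line}<br>"
--         prefix.append(last)
--     out = []
--     for line in lines:
--         i = lines.index(line)
--         out.append(prefix[i] + f"{i+1}: {{{{c1::{line}}}}}")
--     return out
-- ===== Notes on version B (the rewrite author's own statement) =====
-- stated objective: alternative
-- what changed: A rebuilds the numbered prefix string from scratch with a nested loop for every line; B builds a cumulative prefix table once in a single pass and then emits each note by one table lookup at the line's first-occurrence index, folding away A's special-case branch for index 0.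
import Mathlib
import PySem

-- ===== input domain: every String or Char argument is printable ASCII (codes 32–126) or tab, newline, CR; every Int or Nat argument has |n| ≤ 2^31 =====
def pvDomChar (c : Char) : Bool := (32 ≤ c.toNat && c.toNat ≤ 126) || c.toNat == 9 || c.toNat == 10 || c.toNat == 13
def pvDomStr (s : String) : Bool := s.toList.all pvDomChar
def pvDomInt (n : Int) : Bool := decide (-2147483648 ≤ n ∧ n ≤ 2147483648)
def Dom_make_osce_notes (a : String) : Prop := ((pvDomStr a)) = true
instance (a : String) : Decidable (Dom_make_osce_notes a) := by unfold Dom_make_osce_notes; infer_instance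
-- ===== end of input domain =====

-- B replaces A's per-line rebuild of the numbered prefix (nested loop) by a cumulative
-- prefix table built once, then one lookup per line; objective: alternative decomposition.

-- ===== PORT A =====
-- A's inner numbering loop body: state (outstring, i)
def pvAstep (p : String × Int) (l : String) : String × Int :=
  (p.1 ++ PySem.Int.toStr p.2 ++ ": " ++ l ++ "<br>", p.2 + 1)

-- A's outer loop body over `line`
def pvAbody (string_list out_list : List String) (line : String) : List String :=
  match PySem.List.index? string_list line with
  | none => out_list   -- unreachable: `line` is drawn from `string_list`
  | some index_of_line =>
    let out1 := if index_of_line = 0 then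
        out_list ++ ["1: {{c1::" ++ line ++ "}}"] else out_list
    if 0 < index_of_line then
      let not_important_lines := PySem.List.slice string_list none (some (index_of_line : Int))
      let p := not_important_lines.foldl pvAstep ("", 1)
      out1 ++ [p.1 ++ PySem.Int.toStr p.2 ++ ": {{c1::" ++ line ++ "}}"]
    else out1

def make_osce_notes (a : String) : List String :=
  let string_list : List String := (PySem.Str.split? a "\n").getD []
  string_list.foldl (pvAbody string_list) []

-- ===== PORT B =====
-- B's table-building loop body: state (prefix table, last)
def pvBstep (st : List String × String) (kl : Int × String) : List String × String :=
  let last := st.2 ++ PySem.Int.toStr kl.1 ++ ": " ++ kl.2 ++ "<br>"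
  (st.1 ++ [last], last)

-- B's emitting pass for one line
def pvBemit (lines pfx : List String) (line : String) : String :=
  match PySem.List.index? lines line with
  | none => ""   -- unreachable: `line` is drawn from `lines`
  | some i =>
    PySem.List.pyGetD pfx (i : Int) "" ++ PySem.Int.toStr ((i : Int) + 1) ++ ": {{c1::" ++ line ++ "}}"

def make_osce_notes_alt (a : String) : List String :=
  let lines : List String := (PySem.Str.split? a "\n").getD []
  let pb := (PySem.List.enumerate lines 1).foldl pvBstep ([""], "")
  lines.map (pvBemit lines pb.1)

-- ===== PRECONDITION & SPEC =====
def Spec_make_osce_notes (a : String) (out : List String) : Prop := out = make_osce_notes_alt a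
instance (a : String) (out : List String) : Decidable (Spec_make_osce_notes a out) := by unfold Spec_make_osce_notes; infer_instance

-- ===== CLAIM (what is proved, stated in full; the proofs are below) =====
def Claim_equal_make_osce_notes : Prop := ∀ (a : String), Dom_make_osce_notes a → Spec_make_osce_notes a (make_osce_notes a)

-- ===== LEMMAS AND PROOFS =====

/-- The string A's inner loop builds over a given list of earlier lines. -/
def pvP (ys : List String) : String := (ys.foldl pvAstep ("", 1)).1

theorem pvAstep_snd (xs : List String) (s : String) (k : Int) :
    (xs.foldl pvAstep (s, k)).2 = k + xs.length := by
  induction xs generalizing s k with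
  | nil => simp
  | cons x xs ih =>
    simp only [List.foldl_cons, pvAstep, ih, List.length_cons]
    push_cast
    ring

theorem pvP_snoc (pre : List String) (x : String) :
    pvP (pre ++ [x]) = pvP pre ++ PySem.Int.toStr ((pre.length : Int) + 1) ++ ": " ++ x ++ "<br>" := by
  unfold pvP
  rw [List.foldl_append]
  simp only [List.foldl_cons, List.foldl_nil, pvAstep]
  rw [pvAstep_snd, show (1 + (pre.length : Int)) = (pre.length : Int) + 1 from by ring]

theorem pvBuild (xs : List String) : ∀ (pre : List String),
    (PySem.List.enumerate xs ((pre.length : Int) + 1)).foldl pvBstep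
        ((List.range (pre.length + 1)).map (fun j => pvP (pre.take j)), pvP pre)
      = ((List.range (pre.length + xs.length + 1)).map (fun j => pvP ((pre ++ xs).take j)),
         pvP (pre ++ xs)) := by
  induction xs with
  | nil => intro pre; simp
  | cons x xs ih =>
    intro pre
    rw [PySem.List.enumerate_cons]
    simp only [List.foldl_cons]
    have hstep : pvBstep ((List.range (pre.length + 1)).map (fun j => pvP (pre.take j)), pvP pre)
        ((pre.length : Int) + 1, x)
        = ((List.range ((pre ++ [x]).length + 1)).map (fun j => pvP ((pre ++ [x]).take j)),
           pvP (pre ++ [x])) := by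
      simp only [pvBstep, ← pvP_snoc]
      refine Prod.ext ?_ rfl
      simp only [List.length_append, List.length_cons, List.length_nil, Nat.zero_add]
      rw [List.range_succ (n := pre.length + 1), List.map_append]
      congr 1
      · apply List.map_congr_left
        intro j hj
        rw [List.mem_range] at hj
        rw [List.take_append_of_le_length (by omega)]
      · simp
        rw [List.take_of_length_le (by simp)]
    rw [hstep]
    have hcast : ((pre.length : Int) + 1) + 1 = (((pre ++ [x]).length : Int) + 1) := by
      simp
    rw [hcast, ih (pre ++ [x])]
    simp only [List.length_append, List.length_cons, List.length_nil, List.append_assoc,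
      List.cons_append, List.nil_append, Nat.zero_add]
    rw [show pre.length + 1 + xs.length + 1 = pre.length + (xs.length + 1) + 1 from by omega]

/-- Pointwise value of B's emitted note when the prefix table is the one built from `lines`. -/
theorem pvBemit_eq (lines : List String) (line : String) (i : Nat)
    (hidx : PySem.List.index? lines line = some i) (hlt : i < lines.length) :
    pvBemit lines ((List.range (lines.length + 1)).map (fun j => pvP (lines.take j))) line
      = pvP (lines.take i) ++ PySem.Int.toStr ((i : Int) + 1) ++ ": {{c1::" ++ line ++ "}}" := by
  simp only [pvBemit, hidx]
  rw [PySem.List.pyGetD_natCast, PySem.List.getD_map_range _ _ _ _ (by omega)]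

/-- Pointwise: A's loop body appends exactly B's note. -/
theorem pvAbody_eq (lines acc : List String) (line : String) (hmem : line ∈ lines) :
    pvAbody lines acc line
      = acc ++ [pvBemit lines ((List.range (lines.length + 1)).map (fun j => pvP (lines.take j))) line] := by
  have hsome : (PySem.List.index? lines line).isSome = true :=
    (PySem.List.index?_isSome_iff lines line).mpr hmem
  obtain ⟨i, hidx⟩ := Option.isSome_iff_exists.mp hsome
  obtain ⟨hlt, -, -⟩ := PySem.List.getElem_of_index?_eq_some hidx
  rw [pvBemit_eq lines line i hidx hlt]
  simp only [pvAbody, hidx]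
  cases i with
  | zero =>
    rw [if_neg (by omega : ¬ (0:Nat) < 0), if_pos rfl]
    have h0 : pvP (List.take 0 lines) = "" := by rw [List.take_zero]; rfl
    have h1 : PySem.Int.toStr (((0 : Nat) : Int) + 1) = "1" := rfl
    rw [h0, h1]
    simp
  | succ j =>
    rw [if_pos (by omega : 0 < j + 1), if_neg (by omega : ¬ j + 1 = 0)]
    rw [PySem.List.slice_to lines (by omega : (0:Int) ≤ ((j + 1 : Nat) : Int))]
    have harg : (List.foldl pvAstep ("", 1) (List.take (((j + 1 : Nat) : Int)).toNat lines)).2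
        = ((j + 1 : Nat) : Int) + 1 := by
      rw [pvAstep_snd, List.length_take]
      rw [Int.toNat_natCast, Nat.min_eq_left (by omega)]
      push_cast
      ring
    rw [harg]
    rfl

/-- A's fold emits B's notes in order. -/
theorem pvFoldA (lines : List String) : ∀ (rest acc : List String),
    (∀ l ∈ rest, l ∈ lines) →
    rest.foldl (pvAbody lines) acc
      = acc ++ rest.map (pvBemit lines ((List.range (lines.length + 1)).map (fun j => pvP (lines.take j)))) := by
  intro rest
  induction rest with
  | nil => intro acc _; simp
  | cons r rest ih =>
    intro acc hsub
    simp only [List.foldl_cons, List.map_cons]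
    rw [pvAbody_eq lines acc r (hsub r (by simp)),
        ih _ (fun l hl => hsub l (by simp [hl]))]
    simp

-- ===== VERDICT (by name: the statement is the Claim_ definition above) =====
theorem make_osce_notes_spec : Claim_equal_make_osce_notes := by
  intro a _
  unfold Spec_make_osce_notes make_osce_notes make_osce_notes_alt
  generalize (PySem.Str.split? a "\n").getD [] = lines
  have hstart : (([""], "") : List String × String)
      = ((List.range (([] : List String).length + 1)).map (fun j => pvP (([] : List String).take j)), pvP []) := by
    rfl
  have hb := pvBuild lines []
  simp only [List.length_nil, Nat.zero_add, List.nil_append, Nat.cast_zero, Int.zero_add] at hb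
  simp only [hstart]
  simp only [List.length_nil, Nat.zero_add] at hb ⊢
  rw [hb]
  exact pvFoldA lines lines [] (fun l hl => hl)
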